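-- pv_equiv track=rewrite | github.com/EfthyvoulosDrousiotis/DeployStreamLit | discretesampling/domain/decision_tree/helper_functions.py | preprocess_tree
-- ===== SOURCE A (Python) =====
-- def preprocess_tree(tree):
--     """Extract parent nodes, child nodes, and the maximum node ID."""
--     parent_nodes = set()
--     child_nodes = set()
--     max_node_id = -1
--
--     for entry in tree:
--         parent_nodes.add(entry[0])
--         child_nodes.add(entry[1])
--         child_nodes.add(entry[2])
--         max_node_id = max(max_node_id, entry[0], entry[1], entry[2])
--
--     return parent_nodes, child_nodes, max_node_id
-- ===== SOURCE B (Python) =====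
-- def preprocess_tree(tree):
--     """Extract parent nodes, child nodes, and the maximum node ID.
--
--     Divide and conquer: split the tree in half, process each half
--     recursively, and merge the results with set unions and max.
--     """
--     if not tree:
--         return set(), set(), -1
--     if len(tree) == 1:
--         entry = tree[0]
--         return {entry[0]}, {entry[1], entry[2]}, max(entry[0], entry[1], entry[2], -1)
--     mid = len(tree) // 2
--     p1, c1, m1 = preprocess_tree(tree[:mid])
--     p2, c2, m2 = preprocess_tree(tree[mid:])
--     return p1 | p2, c1 | c2, max(m1, m2)
-- ===== Notes on version B (the rewrite author's own statement) =====
-- stated objective: alternative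
-- what changed: Replaces A's single accumulating loop by a divide-and-conquer recursion: split the tree in half, recurse on each half, and merge the two results with set unions and a max.
import Mathlib
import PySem

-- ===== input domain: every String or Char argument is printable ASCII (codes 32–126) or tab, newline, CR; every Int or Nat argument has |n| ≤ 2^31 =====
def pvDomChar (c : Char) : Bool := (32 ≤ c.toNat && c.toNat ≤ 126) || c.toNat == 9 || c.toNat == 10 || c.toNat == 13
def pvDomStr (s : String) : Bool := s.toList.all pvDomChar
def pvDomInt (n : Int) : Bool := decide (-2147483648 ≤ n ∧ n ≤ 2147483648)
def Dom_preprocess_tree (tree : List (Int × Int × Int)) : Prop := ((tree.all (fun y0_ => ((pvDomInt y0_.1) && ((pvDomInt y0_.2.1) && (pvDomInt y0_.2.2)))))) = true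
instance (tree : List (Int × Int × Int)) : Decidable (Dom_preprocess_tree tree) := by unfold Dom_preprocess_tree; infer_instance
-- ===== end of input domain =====

-- B replaces A's single accumulating loop by a divide-and-conquer recursion that splits the
-- tree in half and merges the two half-results with set unions and a max (objective: alternative).

-- ===== PORT A =====
def preprocess_tree (tree : List (Int × Int × Int)) : List Int × List Int × Int :=
  let r := tree.foldl
    (fun (st : PySem.Set Int × PySem.Set Int × Int) e =>
      (PySem.Set.add st.1 e.1,
       PySem.Set.add (PySem.Set.add st.2.1 e.2.1) e.2.2,
       max (max (max st.2.2 e.1) e.2.1) e.2.2))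
    (PySem.Set.empty, PySem.Set.empty, -1)
  (r.1, r.2.1, r.2.2)

-- ===== PORT B =====
-- tree[:mid] / tree[mid:] are ported as List.take / List.drop, exact here since 0 ≤ mid ≤ len(tree).
def preprocess_tree_alt : List (Int × Int × Int) → List Int × List Int × Int
  | [] => (PySem.Set.empty, PySem.Set.empty, -1)
  | [entry] =>
      (PySem.Set.ofList [entry.1], PySem.Set.ofList [entry.2.1, entry.2.2],
       max (max (max entry.1 entry.2.1) entry.2.2) (-1))
  | e :: e' :: rest =>
      let tree := e :: e' :: rest
      let mid := tree.length / 2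
      let r1 := preprocess_tree_alt (tree.take mid)
      let r2 := preprocess_tree_alt (tree.drop mid)
      (PySem.Set.union r1.1 r2.1, PySem.Set.union r1.2.1 r2.2.1, max r1.2.2 r2.2.2)
termination_by t => t.length
decreasing_by
  · simp only [List.length_take, List.length_cons]; omega
  · simp only [List.length_drop, List.length_cons]; omega

-- ===== PRECONDITION & SPEC =====
def Spec_preprocess_tree (tree : List (Int × Int × Int)) (out : List Int × List Int × Int) : Prop := out = preprocess_tree_alt tree
instance (tree : List (Int × Int × Int)) (out : List Int × List Int × Int) : Decidable (Spec_preprocess_tree tree out) := by unfold Spec_preprocess_tree; infer_instance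

-- ===== CLAIM (what is proved, stated in full; the proofs are below) =====
def Claim_equal_preprocess_tree : Prop := ∀ (tree : List (Int × Int × Int)), Dom_preprocess_tree tree → Spec_preprocess_tree tree (preprocess_tree tree)

-- ===== LEMMAS AND PROOFS =====

-- closed form of A's loop
theorem preprocess_tree_foldl (tree : List (Int × Int × Int))
    (p c : PySem.Set Int) (m : Int) :
    tree.foldl
      (fun (st : PySem.Set Int × PySem.Set Int × Int) e =>
        (PySem.Set.add st.1 e.1,
         PySem.Set.add (PySem.Set.add st.2.1 e.2.1) e.2.2,
         max (max (max st.2.2 e.1) e.2.1) e.2.2))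
      (p, c, m)
    = ((tree.map (fun row => row.1)).foldl PySem.Set.add p,
       (tree.flatMap (fun row => [row.2.1, row.2.2])).foldl PySem.Set.add c,
       tree.foldl (fun m e => max (max (max m e.1) e.2.1) e.2.2) m) := by
  induction tree generalizing p c m with
  | nil => rfl
  | cons e t ih =>
    simp only [List.foldl_cons, List.map_cons, List.flatMap_cons, List.cons_append, List.nil_append]
    exact ih _ _ _

-- update by a deduplicated list adds the same new elements as update by the list itself
theorem update_ofList_eq {s : PySem.Set Int} (l : List Int) :
    PySem.Set.update s (PySem.Set.ofList l) = PySem.Set.update s l := by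
  rw [PySem.Set.update_eq_append_filter, PySem.Set.update_eq_append_filter,
      PySem.Set.ofList_ofList]

theorem union_ofList_ofList (xs ys : List Int) :
    PySem.Set.union (PySem.Set.ofList xs) (PySem.Set.ofList ys)
      = PySem.Set.ofList (xs ++ ys) := by
  show PySem.Set.update (PySem.Set.ofList xs) (PySem.Set.ofList ys) = _
  rw [update_ofList_eq, PySem.Set.ofList_append]

-- pulling a max through A's max-fold
theorem foldl_max_pull (t : List (Int × Int × Int)) (m1 m2 : Int) :
    t.foldl (fun m e => max (max (max m e.1) e.2.1) e.2.2) (max m1 m2)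
      = max m1 (t.foldl (fun m e => max (max (max m e.1) e.2.1) e.2.2) m2) := by
  induction t generalizing m2 with
  | nil => rfl
  | cons e t ih =>
    simp only [List.foldl_cons]
    rw [show max (max (max (max m1 m2) e.1) e.2.1) e.2.2
          = max m1 (max (max (max m2 e.1) e.2.1) e.2.2) by
        simp only [max_assoc]]
    exact ih _

theorem foldl_max_le (t : List (Int × Int × Int)) (m : Int) :
    m ≤ t.foldl (fun m e => max (max (max m e.1) e.2.1) e.2.2) m := by
  induction t generalizing m with
  | nil => exact le_refl m
  | cons e t ih =>
    simp only [List.foldl_cons]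
    exact le_trans (le_trans (le_trans (le_max_left m e.1) (le_max_left _ e.2.1))
      (le_max_left _ e.2.2)) (ih _)

theorem foldl_max_append (l1 l2 : List (Int × Int × Int)) :
    (l1 ++ l2).foldl (fun m e => max (max (max m e.1) e.2.1) e.2.2) (-1)
      = max (l1.foldl (fun m e => max (max (max m e.1) e.2.1) e.2.2) (-1))
            (l2.foldl (fun m e => max (max (max m e.1) e.2.1) e.2.2) (-1)) := by
  rw [List.foldl_append]
  conv_lhs => rw [show l1.foldl (fun m e => max (max (max m e.1) e.2.1) e.2.2) (-1)
      = max (l1.foldl (fun m e => max (max (max m e.1) e.2.1) e.2.2) (-1)) (-1) from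
    (max_eq_left (foldl_max_le _ _)).symm]
  rw [foldl_max_pull]

-- closed form of B's recursion: same as A's closed form
theorem preprocess_tree_alt_char (tree : List (Int × Int × Int)) :
    preprocess_tree_alt tree
      = (PySem.Set.ofList (tree.map (fun row => row.1)),
         PySem.Set.ofList (tree.flatMap (fun row => [row.2.1, row.2.2])),
         tree.foldl (fun m e => max (max (max m e.1) e.2.1) e.2.2) (-1)) := by
  induction tree using preprocess_tree_alt.induct with
  | case1 => simp [preprocess_tree_alt]
  | case2 entry =>
    simp only [preprocess_tree_alt, List.map_cons, List.map_nil, List.flatMap_cons,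
      List.flatMap_nil, List.append_nil, List.foldl_cons, List.foldl_nil, Prod.mk.injEq]
    refine ⟨trivial, trivial, ?_⟩
    rw [max_comm _ (-1 : Int)]
    simp only [max_assoc]
  | case3 e e' rest tree mid ih1 ih2 =>
    rw [preprocess_tree_alt]
    rw [ih1, ih2]
    simp only [Prod.mk.injEq]
    have hsplit : tree.take mid ++ tree.drop mid = e :: e' :: rest :=
      List.take_append_drop _ _
    refine ⟨?_, ?_, ?_⟩
    · rw [union_ofList_ofList, ← List.map_append, hsplit]
    · rw [union_ofList_ofList, ← List.flatMap_append, hsplit]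
    · conv_rhs => rw [← hsplit]
      rw [foldl_max_append]

-- ===== VERDICT (by name: the statement is the Claim_ definition above) =====
theorem preprocess_tree_spec : Claim_equal_preprocess_tree := by
  intro tree _
  unfold Spec_preprocess_tree preprocess_tree
  rw [preprocess_tree_foldl, preprocess_tree_alt_char]
  simp [PySem.Set.ofList_eq_foldl, PySem.Set.empty]
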